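-- pv_equiv track=rewrite | github.com/williamjsdavis/UntrackChanges | UntrackChanges/untrackchanges.py | bracket_balance
-- ===== SOURCE A (Python) =====
-- def bracket_balance(text):
--     bracket_level = 0
--     for v in text:
--         if v == '{':
--             bracket_level += 1
--         elif v == '}':
--             bracket_level -= 1
--     return bracket_level
-- ===== SOURCE B (Python) =====
-- def bracket_balance(text):
--     return text.count('{') - text.count('}')
-- ===== Notes on version B (the rewrite author's own statement) =====
-- stated objective: faster
-- what changed: Replaces the single-pass loop with its branching mutable accumulator by two str.count library scans (opening-brace count minus closing-brace count).
import Mathlib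
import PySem

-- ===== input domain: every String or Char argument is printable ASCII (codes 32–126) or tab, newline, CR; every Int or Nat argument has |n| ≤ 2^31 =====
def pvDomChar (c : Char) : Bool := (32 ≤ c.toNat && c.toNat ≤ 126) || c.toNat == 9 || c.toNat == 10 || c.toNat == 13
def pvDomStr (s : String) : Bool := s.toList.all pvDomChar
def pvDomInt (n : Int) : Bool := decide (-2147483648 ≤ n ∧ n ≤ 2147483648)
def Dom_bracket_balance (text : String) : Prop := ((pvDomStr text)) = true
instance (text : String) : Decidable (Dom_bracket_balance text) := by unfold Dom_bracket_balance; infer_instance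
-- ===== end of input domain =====

-- B replaces A's single accumulator loop with two library count scans ('{' minus '}'); objective: idiomatic.

-- ===== PORT A =====
-- literal transliteration: for v in text: if v == '{': +1 elif v == '}': -1
def bracket_balance (text : String) : Int :=
  text.toList.foldl
    (fun bracket_level v =>
      if v = '{' then bracket_level + 1
      else if v = '}' then bracket_level - 1
      else bracket_level) 0

-- ===== PORT B =====
-- literal transliteration of Source B: text.count('{') - text.count('}')
def bracket_balance_alt (text : String) : Int :=
  (PySem.Str.count text "{" : Int) - (PySem.Str.count text "}" : Int)

-- ===== PRECONDITION & SPEC =====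
def Spec_bracket_balance (text : String) (out : Int) : Prop := out = bracket_balance_alt text
instance (text : String) (out : Int) : Decidable (Spec_bracket_balance text out) := by unfold Spec_bracket_balance; infer_instance

-- ===== CLAIM (what is proved, stated in full; the proofs are below) =====
def Claim_equal_bracket_balance : Prop := ∀ (text : String), Dom_bracket_balance text → Spec_bracket_balance text (bracket_balance text)

-- ===== LEMMAS AND PROOFS =====

-- PySem.Chars.count with a single-character needle is List.count
theorem chars_count_go_single (c : Char) (l : List Char) (fuel acc : Nat)
    (h : l.length ≤ fuel) : PySem.Chars.count.go [c] fuel l acc = acc + l.count c := by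
  induction l generalizing fuel acc with
  | nil => cases fuel <;> simp [PySem.Chars.count.go]
  | cons x xs ih =>
    cases fuel with
    | zero => simp at h
    | succ n =>
      simp only [List.length_cons, Nat.succ_le_succ_iff] at h
      by_cases hx : x = c
      · subst hx
        simp [PySem.Chars.count.go, List.isPrefixOf, ih _ _ h]
        omega
      · have : ¬ (List.isPrefixOf [c] (x :: xs) = true) := by
          simp [List.isPrefixOf]; exact fun hxc => (hx hxc.symm).elim
        simp [PySem.Chars.count.go, this, ih _ _ h, hx]

theorem chars_count_single (c : Char) (l : List Char) :
    PySem.Chars.count l [c] = l.count c := by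
  simp [PySem.Chars.count, chars_count_go_single c l l.length 0 le_rfl]

-- A's fold with its running accumulator equals acc + #'{' - #'}'
theorem fold_balance (l : List Char) (a : Int) :
    l.foldl (fun bracket_level v =>
      if v = '{' then bracket_level + 1
      else if v = '}' then bracket_level - 1
      else bracket_level) a = a + (l.count '{' : Int) - (l.count '}' : Int) := by
  induction l generalizing a with
  | nil => simp
  | cons x xs ih =>
    by_cases h1 : x = '{'
    · subst h1; simp [List.foldl_cons, ih]; ring
    · by_cases h2 : x = '}'
      · subst h2; simp [List.foldl_cons, ih]; ring
      · simp [List.foldl_cons, h1, h2, ih]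

-- ===== VERDICT (by name: the statement is the Claim_ definition above) =====
theorem bracket_balance_spec : Claim_equal_bracket_balance := by
  intro text _
  unfold Spec_bracket_balance bracket_balance bracket_balance_alt
  rw [fold_balance, PySem.Str.count_eq, PySem.Str.count_eq]
  have h1 : ("{" : String).toList = ['{'] := by decide
  have h2 : ("}" : String).toList = ['}'] := by decide
  rw [h1, h2, chars_count_single, chars_count_single]
  ring
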